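-- pv_equiv track=rewrite | github.com/Mio0v0/swc-tools | src/swctools/graph.py | precompute_neighbors
-- ===== SOURCE A (Python) =====
-- from typing import Dict, List
--
-- def precompute_neighbors(adj: List[List[int]], depth: int, max_n: int) -> List[List[int]]:
--     if depth <= 1:
--         return [nbrs[:max_n] for nbrs in adj]
--     out = []
--     for u in range(len(adj)):
--         seen = {u}; acc = []
--         for v in adj[u]:
--             if v not in seen: seen.add(v); acc.append(v)
--         for v in adj[u]:
--             for w in adj[v]:
--                 if w not in seen:
--                     seen.add(w); acc.append(w)
--                     if len(acc) >= max_n: break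
--             if len(acc) >= max_n: break
--         out.append(acc[:max_n])
--     return out
-- ===== SOURCE B (Python) =====
-- def precompute_neighbors(adj, depth, max_n):
--     if depth <= 1:
--         return [nbrs[:max_n] for nbrs in adj]
--     out = []
--     for u in range(len(adj)):
--         seen = {u}
--         acc = []
--         frontier = [u]
--         for _ in range(2):
--             nxt = []
--             for x in frontier:
--                 for v in adj[x]:
--                     if v not in seen:
--                         seen.add(v)
--                         acc.append(v)
--                         nxt.append(v)
--             frontier = nxt
--         out.append(acc[:max_n])
--     return out
-- ===== Notes on version B (the rewrite author's own statement) =====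
-- stated objective: alternative
-- what changed: Replaces the two hardcoded nested depth-1/depth-2 loops with early-break bookkeeping by a generic two-generation frontier BFS (seen/acc/frontier, loop twice, no breaks) that expands only the deduplicated first-level frontier and truncates once at the end.
-- outside the precondition, e.g. on precompute_neighbors([[1], [2, 3], [], []], 2, -1): A returns [[1], [2], [], []], B returns [[1, 2], [2], [], []]
import Mathlib
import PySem

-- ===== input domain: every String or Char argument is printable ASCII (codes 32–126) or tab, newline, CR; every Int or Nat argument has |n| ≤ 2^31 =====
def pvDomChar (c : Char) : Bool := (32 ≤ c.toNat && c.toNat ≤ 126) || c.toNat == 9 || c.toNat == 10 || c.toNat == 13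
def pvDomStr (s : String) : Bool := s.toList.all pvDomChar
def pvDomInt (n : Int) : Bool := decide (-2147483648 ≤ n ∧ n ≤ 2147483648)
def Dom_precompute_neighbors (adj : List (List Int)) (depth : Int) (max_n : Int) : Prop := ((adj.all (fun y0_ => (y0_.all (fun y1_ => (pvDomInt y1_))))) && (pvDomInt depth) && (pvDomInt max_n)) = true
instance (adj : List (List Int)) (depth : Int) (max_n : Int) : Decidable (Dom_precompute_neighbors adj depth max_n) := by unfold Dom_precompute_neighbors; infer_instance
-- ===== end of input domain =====

-- B reorganises A's hardcoded depth-1 + depth-2 nested loops (with early breaks) into a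
-- generic two-generation frontier BFS without breaks, truncating once at the end (objective: alternative).

-- ===== PORT A =====
-- phase 1: 'for v in adj[u]: if v not in seen: seen.add(v); acc.append(v)'
def pvA_markStep (p : PySem.Set Int × List Int) (v : Int) : PySem.Set Int × List Int :=
  if v ∈ p.1 then p else (p.1.add v, p.2 ++ [v])

def pvA_phase1 (st : PySem.Set Int × List Int) (l : List Int) : PySem.Set Int × List Int :=
  l.foldl pvA_markStep st

-- inner depth-2 loop with its 'break' flag: state (seen, acc, broke)
def pvA_innerStep (max_n : Int) (r : PySem.Set Int × List Int × Bool) (w : Int) :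
    PySem.Set Int × List Int × Bool :=
  if r.2.2 then r
  else if w ∈ r.1 then r
  else (r.1.add w, r.2.1 ++ [w], decide (max_n ≤ ((r.2.1.length + 1 : Nat) : Int)))

def pvA_inner (max_n : Int) (st : PySem.Set Int × List Int) (row : List Int) :
    PySem.Set Int × List Int × Bool :=
  row.foldl (pvA_innerStep max_n) (st.1, st.2, false)

-- outer depth-2 loop with its own 'break' flag
def pvA_outerStep (adj : List (List Int)) (max_n : Int)
    (q : PySem.Set Int × List Int × Bool) (v : Int) : PySem.Set Int × List Int × Bool :=
  if q.2.2 then q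
  else
    let q' := pvA_inner max_n (q.1, q.2.1) (PySem.List.pyGetD adj v [])
    (q'.1, q'.2.1, decide (max_n ≤ (q'.2.1.length : Int)))

def pvA_phase2 (adj : List (List Int)) (max_n : Int) (st : PySem.Set Int × List Int)
    (l : List Int) : PySem.Set Int × List Int × Bool :=
  l.foldl (pvA_outerStep adj max_n) (st.1, st.2, false)

-- the body of 'for u in range(len(adj))': produces acc (unsliced)
def pvA_body (adj : List (List Int)) (max_n : Int) (u : Int) : List Int :=
  let nb := PySem.List.pyGetD adj u []
  let st1 := pvA_phase1 (PySem.Set.add PySem.Set.empty u, []) nb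
  (pvA_phase2 adj max_n st1 nb).2.1

def precompute_neighbors (adj : List (List Int)) (depth : Int) (max_n : Int) : List (List Int) :=
  if depth ≤ 1 then adj.map (fun nbrs => PySem.List.slice nbrs none (some max_n))
  else
    (PySem.List.pyRange 0 (PySem.List.len adj) 1).foldl
      (fun out u => out ++ [PySem.List.slice (pvA_body adj max_n u) none (some max_n)]) []

-- ===== PORT B =====
-- 'if v not in seen: seen.add(v); acc.append(v); nxt.append(v)' on state (seen, acc, nxt)
def pvB_visitStep (h : PySem.Set Int × List Int × List Int) (v : Int) :
    PySem.Set Int × List Int × List Int :=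
  if v ∈ h.1 then h else (h.1.add v, h.2.1 ++ [v], h.2.2 ++ [v])

def pvB_expand (adj : List (List Int)) (h : PySem.Set Int × List Int × List Int) (x : Int) :
    PySem.Set Int × List Int × List Int :=
  (PySem.List.pyGetD adj x []).foldl pvB_visitStep h

-- one generation: scan the whole frontier, building the next one
def pvB_gen (adj : List (List Int)) (g : PySem.Set Int × List Int × List Int) :
    PySem.Set Int × List Int × List Int :=
  g.2.2.foldl (pvB_expand adj) (g.1, g.2.1, ([] : List Int))

def pvB_body (adj : List (List Int)) (u : Int) : List Int :=
  ((PySem.List.pyRange 0 2 1).foldl (fun g _ => pvB_gen adj g)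
    (PySem.Set.add PySem.Set.empty u, ([] : List Int), [u])).2.1

def precompute_neighbors_alt (adj : List (List Int)) (depth : Int) (max_n : Int) : List (List Int) :=
  if depth ≤ 1 then adj.map (fun nbrs => PySem.List.slice nbrs none (some max_n))
  else
    (PySem.List.pyRange 0 (PySem.List.len adj) 1).foldl
      (fun out u => out ++ [PySem.List.slice (pvB_body adj u) none (some max_n)]) []

-- ===== PRECONDITION & SPEC =====
-- The in-range clause is exactly where Python A returns (adj[v] raises IndexError otherwise;
-- negative in-range v wraps around identically in both programs and stays inside Pre_).
-- Pre_ additionally excludes max_n < 0 when depth > 1 (a negative neighbour cap is outside the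
-- task's natural domain; there A's negative-slice value depends on its accidental break points) and
-- out-of-range entries A happens never to dereference only because its break fired first.
def Pre_precompute_neighbors (adj : List (List Int)) (depth : Int) (max_n : Int) : Prop :=
  1 < depth → (0 ≤ max_n ∧ ∀ row ∈ adj, ∀ v ∈ row, -(adj.length : Int) ≤ v ∧ v < (adj.length : Int))

instance (adj : List (List Int)) (depth : Int) (max_n : Int) :
    Decidable (Pre_precompute_neighbors adj depth max_n) := by
  unfold Pre_precompute_neighbors; infer_instance

def pvWitness_precompute_neighbors : List (List Int) × Int × Int := ([[1, 2], [0, -1], [2, 0]], 2, 3)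

def Spec_precompute_neighbors (adj : List (List Int)) (depth : Int) (max_n : Int) (out : List (List Int)) : Prop := out = precompute_neighbors_alt adj depth max_n
instance (adj : List (List Int)) (depth : Int) (max_n : Int) (out : List (List Int)) : Decidable (Spec_precompute_neighbors adj depth max_n out) := by unfold Spec_precompute_neighbors; infer_instance

-- ===== CLAIM (what is proved, stated in full; the proofs are below) =====
def Claim_equal_precompute_neighbors : Prop := ∀ (adj : List (List Int)) (depth : Int) (max_n : Int), Dom_precompute_neighbors adj depth max_n → Pre_precompute_neighbors adj depth max_n → Spec_precompute_neighbors adj depth max_n (precompute_neighbors adj depth max_n)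

-- ===== LEMMAS AND PROOFS =====

-- first occurrences of l that are not already in s (phase-1 collection order)
def pvFirstOcc (s : PySem.Set Int) (l : List Int) : List Int :=
  match l with
  | [] => []
  | v :: t => if v ∈ s then pvFirstOcc s t else v :: pvFirstOcc (s.add v) t

-- breakless depth-2 scan: expand adj[v] for each v of l
def pvScan (adj : List (List Int)) (st : PySem.Set Int × List Int) (l : List Int) :
    PySem.Set Int × List Int :=
  l.foldl (fun p v => pvA_phase1 p (PySem.List.pyGetD adj v [])) st

theorem pvA_phase1_eq (l : List Int) : ∀ s a,
    pvA_phase1 (s, a) l = (PySem.Set.update s l, a ++ pvFirstOcc s l) := by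
  induction l with
  | nil => intro s a; simp [pvA_phase1, pvFirstOcc, PySem.Set.update]
  | cons v t ih =>
    intro s a
    by_cases hv : v ∈ s
    · simp only [pvA_phase1, List.foldl_cons, pvA_markStep, if_pos hv, pvFirstOcc,
        PySem.Set.update_cons, PySem.Set.add_of_mem hv]
      exact ih s a
    · simp only [pvA_phase1, List.foldl_cons, pvA_markStep, if_neg hv, pvFirstOcc,
        PySem.Set.update_cons]
      rw [show (List.foldl pvA_markStep (PySem.Set.add s v, a ++ [v]) t)
            = pvA_phase1 (PySem.Set.add s v, a ++ [v]) t from rfl, ih]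
      simp

theorem pvScan_acc_prefix (l : List Int) : ∀ adj s a, a <+: (pvScan adj (s, a) l).2 := by
  induction l with
  | nil => intro adj s a; simp [pvScan]
  | cons v t ih =>
    intro adj s a
    simp only [pvScan, List.foldl_cons, pvA_phase1_eq]
    exact List.IsPrefix.trans (List.prefix_append a _) (ih adj _ _)

-- expanding a row all of whose elements are already seen changes nothing
theorem pvFirstOcc_all_seen (l : List Int) : ∀ (s : PySem.Set Int),
    (∀ w ∈ l, w ∈ s) → pvFirstOcc s l = [] := by
  induction l with
  | nil => intro s _; rfl
  | cons v t ih =>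
    intro s h
    simp only [pvFirstOcc, if_pos (h v (by simp))]
    exact ih s (fun w hw => h w (by simp [hw]))

theorem pvUpdate_all_seen (l : List Int) : ∀ (s : PySem.Set Int),
    (∀ w ∈ l, w ∈ s) → PySem.Set.update s l = s := by
  induction l with
  | nil => intro s _; rfl
  | cons v t ih =>
    intro s h
    rw [PySem.Set.update_cons, PySem.Set.add_of_mem (h v (by simp))]
    exact ih s (fun w hw => h w (by simp [hw]))

-- expanding a row all of whose elements are already seen changes nothing
theorem pvA_phase1_all_seen (l : List Int) (s : PySem.Set Int) (a : List Int)
    (h : ∀ w ∈ l, w ∈ s) : pvA_phase1 (s, a) l = (s, a) := by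
  rw [pvA_phase1_eq, pvFirstOcc_all_seen l s h, pvUpdate_all_seen l s h]
  simp

-- the MAIN skip lemma: scanning l equals scanning its first occurrences relative to s0,
-- provided every member of s0 has its whole row already in the current seen set
theorem pvScan_firstOcc (adj : List (List Int)) (l : List Int) : ∀ (s0 s : PySem.Set Int) (a : List Int),
    (∀ v ∈ s0, ∀ w ∈ PySem.List.pyGetD adj v [], w ∈ s) →
    pvScan adj (s, a) l = pvScan adj (s, a) (pvFirstOcc s0 l) := by
  induction l with
  | nil => intro s0 s a _; rfl
  | cons v t ih =>
    intro s0 s a h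
    by_cases hv : v ∈ s0
    · simp only [pvScan, List.foldl_cons, pvFirstOcc, if_pos hv]
      rw [pvA_phase1_all_seen _ _ _ (h v hv)]
      exact ih s0 s a h
    · simp only [pvScan, List.foldl_cons, pvFirstOcc, if_neg hv]
      rw [pvA_phase1_eq]
      exact ih (PySem.Set.add s0 v) _ _ (by
        intro v' hv' w hw
        rcases (PySem.Set.mem_add s0 v v').mp hv' with h' | h'
        · exact (PySem.Set.mem_update _ _ _).mpr (Or.inl (h v' h' w hw))
        · subst h'; exact (PySem.Set.mem_update _ _ _).mpr (Or.inr hw))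

-- B's triple-state visit loop projects onto phase 1 (acc and nxt get the same new elements)
theorem pvB_visit_eq (l : List Int) : ∀ s a n,
    l.foldl pvB_visitStep (s, a, n)
      = (PySem.Set.update s l, a ++ pvFirstOcc s l, n ++ pvFirstOcc s l) := by
  induction l with
  | nil => intro s a n; simp [PySem.Set.update, pvFirstOcc]
  | cons v t ih =>
    intro s a n
    by_cases hv : v ∈ s
    · simp only [List.foldl_cons, pvB_visitStep, if_pos hv, pvFirstOcc,
        PySem.Set.update_cons, PySem.Set.add_of_mem hv]
      exact ih s a n
    · simp only [List.foldl_cons, pvB_visitStep, if_neg hv, pvFirstOcc,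
        PySem.Set.update_cons]
      rw [ih]
      simp

-- a whole frontier scan of B projects onto the breakless scan
theorem pvB_frontier_eq (adj : List (List Int)) (l : List Int) : ∀ s a n,
    l.foldl (pvB_expand adj) (s, a, n)
      = ((pvScan adj (s, a) l).1, (pvScan adj (s, a) l).2,
         n ++ (pvScan adj (s, a) l).2.drop a.length) := by
  induction l with
  | nil => intro s a n; simp [pvScan]
  | cons v t ih =>
    intro s a n
    simp only [List.foldl_cons, pvB_expand]
    rw [pvB_visit_eq]
    rw [show (List.foldl (pvB_expand adj)
          (PySem.Set.update s (PySem.List.pyGetD adj v []),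
           a ++ pvFirstOcc s (PySem.List.pyGetD adj v []),
           n ++ pvFirstOcc s (PySem.List.pyGetD adj v [])) t)
        = t.foldl (pvB_expand adj)
          (PySem.Set.update s (PySem.List.pyGetD adj v []),
           a ++ pvFirstOcc s (PySem.List.pyGetD adj v []),
           n ++ pvFirstOcc s (PySem.List.pyGetD adj v [])) from rfl, ih]
    have hsc : pvScan adj (s, a) (v :: t)
        = pvScan adj (PySem.Set.update s (PySem.List.pyGetD adj v []),
            a ++ pvFirstOcc s (PySem.List.pyGetD adj v [])) t := by
      simp only [pvScan, List.foldl_cons, pvA_phase1_eq]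
    rw [hsc]
    obtain ⟨rest, hX⟩ := pvScan_acc_prefix t adj
      (PySem.Set.update s (PySem.List.pyGetD adj v []))
      (a ++ pvFirstOcc s (PySem.List.pyGetD adj v []))
    refine Prod.ext rfl (Prod.ext rfl ?_)
    simp only [← hX]
    rw [List.drop_left' (l₁ := a ++ pvFirstOcc s (PySem.List.pyGetD adj v [])) (by simp),
        List.append_assoc a, List.drop_left' (l₁ := a) rfl]
    simp

-- once the inner break has fired the inner loop is frozen
theorem pvA_inner_frozen (max_n : Int) (l : List Int) : ∀ s a,
    l.foldl (pvA_innerStep max_n) (s, a, true) = (s, a, true) := by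
  induction l with
  | nil => intro s a; rfl
  | cons w t ih => intro s a; simp only [List.foldl_cons, pvA_innerStep, if_true]; exact ih s a

theorem pvA_outer_frozen (adj : List (List Int)) (max_n : Int) (l : List Int) : ∀ s a,
    l.foldl (pvA_outerStep adj max_n) (s, a, true) = (s, a, true) := by
  induction l with
  | nil => intro s a; rfl
  | cons v t ih => intro s a; simp only [List.foldl_cons, pvA_outerStep, if_true]; exact ih s a

-- the inner loop with break either finishes as phase 1 does, or stops on a prefix of length ≥ max_n
theorem pvA_inner_cases (max_n : Int) (row : List Int) : ∀ s a,
    (pvA_inner max_n (s, a) row).2.2 = false ∧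
      ((pvA_inner max_n (s, a) row).1, (pvA_inner max_n (s, a) row).2.1) = pvA_phase1 (s, a) row
    ∨ (pvA_inner max_n (s, a) row).2.2 = true ∧
      (pvA_inner max_n (s, a) row).2.1 <+: (pvA_phase1 (s, a) row).2 ∧
      max_n ≤ ((pvA_inner max_n (s, a) row).2.1.length : Int) := by
  induction row with
  | nil => intro s a; left; exact ⟨rfl, rfl⟩
  | cons w t ih =>
    intro s a
    by_cases hw : w ∈ s
    · simpa only [pvA_inner, List.foldl_cons, pvA_innerStep, Bool.false_eq_true, if_false,
        if_pos hw, pvA_phase1, pvA_markStep] using ih s a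
    · by_cases hb : max_n ≤ ((a.length + 1 : Nat) : Int)
      · -- break fires immediately after appending w
        right
        have hfr := pvA_inner_frozen max_n t (PySem.Set.add s w) (a ++ [w])
        simp only [pvA_inner, List.foldl_cons, pvA_innerStep, Bool.false_eq_true, if_false,
          if_neg hw, decide_eq_true hb]
        rw [hfr]
        refine ⟨rfl, ?_, by simpa using hb⟩
        simp only [pvA_phase1, List.foldl_cons, pvA_markStep, if_neg hw]
        rw [show (List.foldl pvA_markStep (PySem.Set.add s w, a ++ [w]) t)
              = pvA_phase1 (PySem.Set.add s w, a ++ [w]) t from rfl, pvA_phase1_eq]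
        exact List.prefix_append _ _
      · have hd : decide (max_n ≤ ((a.length + 1 : Nat) : Int)) = false := by
          simpa using hb
        simpa only [pvA_inner, List.foldl_cons, pvA_innerStep, Bool.false_eq_true, if_false,
          if_neg hw, hd, pvA_phase1, pvA_markStep] using ih (PySem.Set.add s w) (a ++ [w])

-- the outer loop with break either finishes as the breakless scan does, or stops on a prefix of length ≥ max_n
theorem pvA_outer_cases (adj : List (List Int)) (max_n : Int) (l : List Int) : ∀ s a,
    (pvA_phase2 adj max_n (s, a) l).2.2 = false ∧
      ((pvA_phase2 adj max_n (s, a) l).1, (pvA_phase2 adj max_n (s, a) l).2.1) = pvScan adj (s, a) l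
    ∨ (pvA_phase2 adj max_n (s, a) l).2.1 <+: (pvScan adj (s, a) l).2 ∧
      max_n ≤ ((pvA_phase2 adj max_n (s, a) l).2.1.length : Int) := by
  induction l with
  | nil => intro s a; left; exact ⟨rfl, rfl⟩
  | cons v t ih =>
    intro s a
    have hP : pvScan adj (s, a) (v :: t)
        = pvScan adj (pvA_phase1 (s, a) (PySem.List.pyGetD adj v [])) t := by
      simp only [pvScan, List.foldl_cons]
    have hPpre : (pvA_phase1 (s, a) (PySem.List.pyGetD adj v [])).2
        <+: (pvScan adj (s, a) (v :: t)).2 := by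
      rw [hP]
      simpa using pvScan_acc_prefix t adj
        (pvA_phase1 (s, a) (PySem.List.pyGetD adj v [])).1
        (pvA_phase1 (s, a) (PySem.List.pyGetD adj v [])).2
    rcases pvA_inner_cases max_n (PySem.List.pyGetD adj v []) s a with ⟨hb, heq⟩ | ⟨hb, hpre, hlen⟩
    · -- inner finished normally
      have h1 : (pvA_inner max_n (s, a) (PySem.List.pyGetD adj v [])).1
          = (pvA_phase1 (s, a) (PySem.List.pyGetD adj v [])).1 := congrArg Prod.fst heq
      have h2 : (pvA_inner max_n (s, a) (PySem.List.pyGetD adj v [])).2.1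
          = (pvA_phase1 (s, a) (PySem.List.pyGetD adj v [])).2 := congrArg Prod.snd heq
      by_cases hd : max_n ≤ (((pvA_inner max_n (s, a) (PySem.List.pyGetD adj v [])).2.1.length : Nat) : Int)
      · -- the outer length check fires: loop frozen on phase-1's acc
        right
        simp only [pvA_phase2, List.foldl_cons, pvA_outerStep, Bool.false_eq_true, if_false,
          decide_eq_true hd]
        rw [pvA_outer_frozen]
        exact ⟨h2 ▸ hPpre, by simpa [h2] using hd⟩
      · have hd2 : decide (max_n ≤ ((pvA_phase1 (s, a) (PySem.List.pyGetD adj v [])).2.length : Int)) = false := by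
          rw [← h2]; simpa using hd
        simp only [pvA_phase2, List.foldl_cons, pvA_outerStep, Bool.false_eq_true, if_false,
          h1, h2, hd2, hP]
        simpa only [pvA_phase2, Prod.mk.eta] using
          ih (pvA_phase1 (s, a) (PySem.List.pyGetD adj v [])).1
             (pvA_phase1 (s, a) (PySem.List.pyGetD adj v [])).2
    · -- inner broke: the outer length check also fires and the loop is frozen
      right
      have hd : decide (max_n ≤ (((pvA_inner max_n (s, a) (PySem.List.pyGetD adj v [])).2.1.length : Nat) : Int)) = true := by
        simpa using hlen
      simp only [pvA_phase2, List.foldl_cons, pvA_outerStep, Bool.false_eq_true, if_false, hd]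
      rw [pvA_outer_frozen]
      exact ⟨hpre.trans hPpre, hlen⟩

-- per-node equality of the sliced results
theorem pv_body_eq (adj : List (List Int)) (max_n : Int) (u : Int) (hm : 0 ≤ max_n) :
    PySem.List.slice (pvA_body adj max_n u) none (some max_n)
      = PySem.List.slice (pvB_body adj u) none (some max_n) := by
  have hrange : PySem.List.pyRange 0 2 1 = [0, 1] := by decide
  have hst1 : pvA_phase1 (PySem.Set.add PySem.Set.empty u, []) (PySem.List.pyGetD adj u [])
      = (PySem.Set.update (PySem.Set.add PySem.Set.empty u) (PySem.List.pyGetD adj u []),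
         pvFirstOcc (PySem.Set.add PySem.Set.empty u) (PySem.List.pyGetD adj u [])) := by
    rw [pvA_phase1_eq]; simp
  have hBacc : pvB_body adj u
      = (pvScan adj
          (PySem.Set.update (PySem.Set.add PySem.Set.empty u) (PySem.List.pyGetD adj u []),
           pvFirstOcc (PySem.Set.add PySem.Set.empty u) (PySem.List.pyGetD adj u []))
          (pvFirstOcc (PySem.Set.add PySem.Set.empty u) (PySem.List.pyGetD adj u []))).2 := by
    unfold pvB_body
    rw [hrange]
    simp only [List.foldl_cons, List.foldl_nil]
    have hg1 : pvB_gen adj (PySem.Set.add PySem.Set.empty u, ([] : List Int), [u])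
        = (PySem.Set.update (PySem.Set.add PySem.Set.empty u) (PySem.List.pyGetD adj u []),
           pvFirstOcc (PySem.Set.add PySem.Set.empty u) (PySem.List.pyGetD adj u []),
           pvFirstOcc (PySem.Set.add PySem.Set.empty u) (PySem.List.pyGetD adj u [])) := by
      unfold pvB_gen
      simp only [List.foldl_cons, List.foldl_nil, pvB_expand]
      rw [pvB_visit_eq]; simp
    rw [hg1]
    unfold pvB_gen
    rw [pvB_frontier_eq]
  have hscan : pvScan adj
        (PySem.Set.update (PySem.Set.add PySem.Set.empty u) (PySem.List.pyGetD adj u []),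
         pvFirstOcc (PySem.Set.add PySem.Set.empty u) (PySem.List.pyGetD adj u []))
        (PySem.List.pyGetD adj u [])
      = pvScan adj
        (PySem.Set.update (PySem.Set.add PySem.Set.empty u) (PySem.List.pyGetD adj u []),
         pvFirstOcc (PySem.Set.add PySem.Set.empty u) (PySem.List.pyGetD adj u []))
        (pvFirstOcc (PySem.Set.add PySem.Set.empty u) (PySem.List.pyGetD adj u [])) := by
    apply pvScan_firstOcc
    intro v hv w hw
    rcases (PySem.Set.mem_add PySem.Set.empty u v).mp hv with h | h
    · simp [PySem.Set.empty] at h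
    · subst h
      exact (PySem.Set.mem_update _ _ _).mpr (Or.inr hw)
  show PySem.List.slice
      (pvA_phase2 adj max_n
        (pvA_phase1 (PySem.Set.add PySem.Set.empty u, []) (PySem.List.pyGetD adj u []))
        (PySem.List.pyGetD adj u [])).2.1 none (some max_n) = _
  rw [hst1]
  rcases pvA_outer_cases adj max_n (PySem.List.pyGetD adj u [])
      (PySem.Set.update (PySem.Set.add PySem.Set.empty u) (PySem.List.pyGetD adj u []))
      (pvFirstOcc (PySem.Set.add PySem.Set.empty u) (PySem.List.pyGetD adj u []))
    with ⟨_, heq⟩ | ⟨hpre, hlen⟩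
  · rw [show (pvA_phase2 adj max_n
        (PySem.Set.update (PySem.Set.add PySem.Set.empty u) (PySem.List.pyGetD adj u []),
         pvFirstOcc (PySem.Set.add PySem.Set.empty u) (PySem.List.pyGetD adj u []))
        (PySem.List.pyGetD adj u [])).2.1
      = (pvScan adj
          (PySem.Set.update (PySem.Set.add PySem.Set.empty u) (PySem.List.pyGetD adj u []),
           pvFirstOcc (PySem.Set.add PySem.Set.empty u) (PySem.List.pyGetD adj u []))
          (PySem.List.pyGetD adj u [])).2 from congrArg Prod.snd heq, hscan, ← hBacc]
  · rw [hBacc, ← hscan]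
    obtain ⟨rest, hX⟩ := hpre
    rw [← hX, PySem.List.slice_to _ hm, PySem.List.slice_to _ hm,
        List.take_append_of_le_length (by omega)]

-- ===== VERDICT (by name: the statement is the Claim_ definition above) =====
theorem precompute_neighbors_spec : Claim_equal_precompute_neighbors := by
  intro adj depth max_n _ hpre
  unfold Spec_precompute_neighbors precompute_neighbors precompute_neighbors_alt
  by_cases hd : depth ≤ 1
  · simp [hd]
  · obtain ⟨hm, _⟩ := hpre (by omega)
    simp only [hd, if_false]
    have : (fun (out : List (List Int)) u => out ++ [PySem.List.slice (pvA_body adj max_n u) none (some max_n)])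
        = (fun (out : List (List Int)) u => out ++ [PySem.List.slice (pvB_body adj u) none (some max_n)]) := by
      funext out u
      rw [pv_body_eq adj max_n u hm]
    rw [this]
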